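-- pv_equiv track=rewrite | github.com/GabrielStronger/Pilha-como-Estrutura-Encadeada- | sequencia_retiradas_carros.py | sequencia_retirada
-- ===== SOURCE A (Python) =====
-- class Pilha:
--     def __init__(self):
--         self.elementos = []
--
--     def empilhar(self, elemento):
--         self.elementos.append(elemento)
--
--     def desempilhar(self):
--         if not self.vazia():
--             return self.elementos.pop()
--         raise IndexError("Pilha vazia!")
--
--     def vazia(self):
--         return len(self.elementos) == 0
--
-- def sequencia_retirada(placas, placa_desejada):
--     pilha = Pilha()
--     for placa in placas:
--         pilha.empilhar(placa)
--     sequencia = []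
--     while not pilha.vazia():
--         placa_atual = pilha.desempilhar()
--         sequencia.append(placa_atual)
--         if placa_atual == placa_desejada:
--             break
--     return sequencia[::-1]
-- ===== SOURCE B (Python) =====
-- def sequencia_retirada(placas, placa_desejada):
--     lst = list(placas)
--     for i in range(len(lst) - 1, -1, -1):
--         if lst[i] == placa_desejada:
--             return lst[i:]
--     return lst
-- ===== Notes on version B (the rewrite author's own statement) =====
-- stated objective: simpler
-- what changed: Replaces the push-all/pop-until-match/reverse stack simulation with a single reverse index scan for the last occurrence followed by one slice.
import Mathlib
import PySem

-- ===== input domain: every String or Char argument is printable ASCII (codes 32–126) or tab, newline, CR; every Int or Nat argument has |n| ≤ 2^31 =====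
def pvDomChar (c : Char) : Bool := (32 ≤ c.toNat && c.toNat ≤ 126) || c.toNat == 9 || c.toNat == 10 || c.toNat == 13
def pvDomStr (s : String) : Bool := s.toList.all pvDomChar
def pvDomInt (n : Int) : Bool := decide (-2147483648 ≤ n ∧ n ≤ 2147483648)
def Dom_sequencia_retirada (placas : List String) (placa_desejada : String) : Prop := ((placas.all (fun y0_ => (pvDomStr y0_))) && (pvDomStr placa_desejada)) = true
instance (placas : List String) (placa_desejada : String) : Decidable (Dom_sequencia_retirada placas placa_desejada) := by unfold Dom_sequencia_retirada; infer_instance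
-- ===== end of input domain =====

-- B replaces A's push-all/pop-until-match/reverse stack simulation by one reverse
-- scan for the last occurrence plus a single slice (objective: simpler).

-- ===== PORT A =====
-- the while-loop: pop from the stack (front of the reversed list), append to
-- `sequencia`, stop on a match or when the stack is empty
def pvPopLoop (stack : List String) (placa_desejada : String) (sequencia : List String) : List String :=
  match stack with
  | [] => sequencia
  | placa_atual :: rest =>
    if placa_atual == placa_desejada then sequencia ++ [placa_atual]
    else pvPopLoop rest placa_desejada (sequencia ++ [placa_atual])

def sequencia_retirada (placas : List String) (placa_desejada : String) : List String :=
  -- pushing all of `placas` makes a stack whose pop order is `placas.reverse`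
  (pvPopLoop placas.reverse placa_desejada []).reverse

-- ===== PORT B =====
-- the `for i in range(len(lst)-1, -1, -1)` loop: the Nat argument is i+1
def pvScanB (lst : List String) (placa_desejada : String) : Nat → List String
  | 0 => lst
  | n + 1 =>
    match lst[n]? with
    | some p => if p == placa_desejada then lst.drop n else pvScanB lst placa_desejada n
    | none => pvScanB lst placa_desejada n

def sequencia_retirada_alt (placas : List String) (placa_desejada : String) : List String :=
  pvScanB placas placa_desejada placas.length

-- ===== PRECONDITION & SPEC =====
def Spec_sequencia_retirada (placas : List String) (placa_desejada : String) (out : List String) : Prop := out = sequencia_retirada_alt placas placa_desejada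
instance (placas : List String) (placa_desejada : String) (out : List String) : Decidable (Spec_sequencia_retirada placas placa_desejada out) := by unfold Spec_sequencia_retirada; infer_instance

-- ===== CLAIM (what is proved, stated in full; the proofs are below) =====
def Claim_equal_sequencia_retirada : Prop := ∀ (placas : List String) (placa_desejada : String), Dom_sequencia_retirada placas placa_desejada → Spec_sequencia_retirada placas placa_desejada (sequencia_retirada placas placa_desejada)

-- ===== LEMMAS AND PROOFS =====

-- common characterisation: prefix of xs up to and including the first match
def pvTakeIncl (tgt : String) : List String → List String
  | [] => []
  | x :: xs => if x == tgt then [x] else x :: pvTakeIncl tgt xs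

theorem pvPopLoop_eq (tgt : String) (xs acc : List String) :
    pvPopLoop xs tgt acc = acc ++ pvTakeIncl tgt xs := by
  induction xs generalizing acc with
  | nil => simp [pvPopLoop, pvTakeIncl]
  | cons x xs ih =>
    simp only [pvPopLoop, pvTakeIncl]
    split_ifs with h <;> simp [ih]

theorem pvScanB_append (tgt : String) (ys : List String) (x : String) (n : Nat)
    (hn : n ≤ ys.length) :
    pvScanB (ys ++ [x]) tgt n = pvScanB ys tgt n ++ [x] := by
  induction n with
  | zero => simp [pvScanB]
  | succ n ih =>
    have hlt : n < ys.length := hn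
    have hget : (ys ++ [x])[n]? = ys[n]? := by
      rw [List.getElem?_append_left hlt]
    simp only [pvScanB, hget]
    cases hy : ys[n]? with
    | none => rw [List.getElem?_eq_none_iff] at hy; omega
    | some p =>
      dsimp only
      split_ifs with h
      · rw [List.drop_append_of_le_length (by omega)]
      · exact ih (by omega)

theorem pvScanB_eq (tgt : String) (lst : List String) :
    pvScanB lst tgt lst.length = (pvTakeIncl tgt lst.reverse).reverse := by
  induction lst using List.reverseRecOn with
  | nil => simp [pvScanB, pvTakeIncl]
  | append_singleton ys x ih =>
    have hlen : (ys ++ [x]).length = ys.length + 1 := by simp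
    rw [hlen]
    simp only [pvScanB]
    have hget : (ys ++ [x])[ys.length]? = some x := by
      simp
    rw [hget]
    simp only [List.reverse_append, List.reverse_singleton, List.singleton_append, pvTakeIncl]
    split_ifs with h
    · simp
    · rw [pvScanB_append tgt ys x ys.length le_rfl, ih]
      simp

-- ===== VERDICT (by name: the statement is the Claim_ definition above) =====
theorem sequencia_retirada_spec : Claim_equal_sequencia_retirada := by
  intro placas tgt _
  show sequencia_retirada placas tgt = sequencia_retirada_alt placas tgt
  rw [sequencia_retirada, sequencia_retirada_alt, pvPopLoop_eq, pvScanB_eq]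
  simp
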